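-- pv_equiv track=rewrite | github.com/lokv010/voiceagent | services/callback_scheduler.py | _extract_callback_info_from_speech
-- ===== SOURCE A (Python) =====
-- from typing import Dict, List, Optional, Tuple
--
-- def _extract_callback_info_from_speech(customer_input: str) -> Dict:
--     """Extract callback scheduling info from natural language"""
--     input_lower = customer_input.lower()
--     callback_info = {}
--
--     # Time extraction
--     if 'tomorrow' in input_lower:
--         callback_info['requested_time'] = 'tomorrow'
--     elif 'next week' in input_lower:
--         callback_info['requested_time'] = 'next week'
--     elif 'monday' in input_lower:
--         callback_info['requested_time'] = 'monday'
--     elif 'tuesday' in input_lower: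
--         callback_info['requested_time'] = 'tuesday'
--     elif 'wednesday' in input_lower:
--         callback_info['requested_time'] = 'wednesday'
--     elif 'thursday' in input_lower:
--         callback_info['requested_time'] = 'thursday'
--     elif 'friday' in input_lower:
--         callback_info['requested_time'] = 'friday'
--
--     # Time preference
--     if 'morning' in input_lower:
--         callback_info['time_preference'] = 'morning'
--     elif 'afternoon' in input_lower:
--         callback_info['time_preference'] = 'afternoon'
--     elif 'evening' in input_lower:
--         callback_info['time_preference'] = 'evening'
--     else:
--         callback_info['time_preference'] = 'anytime'
--
--     # Urgency level
--     if any(word in input_lower for word in ['urgent', 'asap', 'immediately', 'emergency']):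
--         callback_info['urgency_level'] = 'urgent'
--     elif any(word in input_lower for word in ['soon', 'quickly', 'priority']):
--         callback_info['urgency_level'] = 'high'
--     else:
--         callback_info['urgency_level'] = 'normal'
--
--     return callback_info
-- ===== SOURCE B (Python) =====
-- def _extract_callback_info_from_speech(customer_input: str) -> dict:
--     """Single sweep over the text collecting every occurring keyword into a set,
--     then resolve each field from the set by priority."""
--     text = customer_input.lower()
--     keywords = ['tomorrow', 'next week', 'monday', 'tuesday', 'wednesday',
--                 'thursday', 'friday', 'morning', 'afternoon', 'evening',
--                 'urgent', 'asap', 'immediately', 'emergency', 'soon',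
--                 'quickly', 'priority']
--     found = set()
--     for i in range(len(text)):
--         for kw in keywords:
--             if text.startswith(kw, i):
--                 found.add(kw)
--
--     info = {}
--     for kw in ['tomorrow', 'next week', 'monday', 'tuesday', 'wednesday',
--                'thursday', 'friday']:
--         if kw in found:
--             info['requested_time'] = kw
--             break
--     for kw in ['morning', 'afternoon', 'evening']:
--         if kw in found:
--             info['time_preference'] = kw
--             break
--     else:
--         info['time_preference'] = 'anytime'
--     if not {'urgent', 'asap', 'immediately', 'emergency'}.isdisjoint(found):
--         info['urgency_level'] = 'urgent'
--     elif not {'soon', 'quickly', 'priority'}.isdisjoint(found):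
--         info['urgency_level'] = 'high'
--     else:
--         info['urgency_level'] = 'normal'
--     return info
-- ===== Notes on version B (the rewrite author's own statement) =====
-- stated objective: alternative
-- what changed: B replaces A's per-field if/elif substring chains with a single positional sweep over the text that collects every occurring keyword into a set (startswith at each index), and then resolves the three fields from that set by priority.
import Mathlib
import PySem

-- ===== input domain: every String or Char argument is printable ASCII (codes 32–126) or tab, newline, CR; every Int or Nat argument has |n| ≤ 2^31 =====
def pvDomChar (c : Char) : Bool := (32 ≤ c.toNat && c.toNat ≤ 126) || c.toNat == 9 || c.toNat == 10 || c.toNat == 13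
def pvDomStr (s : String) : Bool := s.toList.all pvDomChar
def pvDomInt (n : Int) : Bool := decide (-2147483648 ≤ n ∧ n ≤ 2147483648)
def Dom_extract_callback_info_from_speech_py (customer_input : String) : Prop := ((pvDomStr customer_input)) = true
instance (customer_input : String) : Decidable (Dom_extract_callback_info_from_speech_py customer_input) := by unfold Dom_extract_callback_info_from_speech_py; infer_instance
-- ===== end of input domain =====

-- B replaces A's per-field if/elif substring chains by one positional sweep collecting occurring keywords into a set, then priority resolution from the set; same results.


-- ===== PORT A =====
def extract_callback_info_from_speech_py (customer_input : String) : List (String × String) :=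
  let input_lower := PySem.Str.lower customer_input
  let callback_info : PySem.Dict String String := PySem.Dict.empty
  -- Time extraction
  let callback_info :=
    if PySem.Str.isIn "tomorrow" input_lower then PySem.Dict.insert callback_info "requested_time" "tomorrow"
    else if PySem.Str.isIn "next week" input_lower then PySem.Dict.insert callback_info "requested_time" "next week"
    else if PySem.Str.isIn "monday" input_lower then PySem.Dict.insert callback_info "requested_time" "monday"
    else if PySem.Str.isIn "tuesday" input_lower then PySem.Dict.insert callback_info "requested_time" "tuesday"
    else if PySem.Str.isIn "wednesday" input_lower then PySem.Dict.insert callback_info "requested_time" "wednesday"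
    else if PySem.Str.isIn "thursday" input_lower then PySem.Dict.insert callback_info "requested_time" "thursday"
    else if PySem.Str.isIn "friday" input_lower then PySem.Dict.insert callback_info "requested_time" "friday"
    else callback_info
  -- Time preference
  let callback_info :=
    if PySem.Str.isIn "morning" input_lower then PySem.Dict.insert callback_info "time_preference" "morning"
    else if PySem.Str.isIn "afternoon" input_lower then PySem.Dict.insert callback_info "time_preference" "afternoon"
    else if PySem.Str.isIn "evening" input_lower then PySem.Dict.insert callback_info "time_preference" "evening"
    else PySem.Dict.insert callback_info "time_preference" "anytime"
  -- Urgency level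
  let callback_info :=
    if (["urgent", "asap", "immediately", "emergency"].any (fun word => PySem.Str.isIn word input_lower)) then
      PySem.Dict.insert callback_info "urgency_level" "urgent"
    else if (["soon", "quickly", "priority"].any (fun word => PySem.Str.isIn word input_lower)) then
      PySem.Dict.insert callback_info "urgency_level" "high"
    else PySem.Dict.insert callback_info "urgency_level" "normal"
  callback_info.items

-- ===== PORT B =====
def pvKeywords : List String :=
  ["tomorrow", "next week", "monday", "tuesday", "wednesday", "thursday", "friday",
   "morning", "afternoon", "evening", "urgent", "asap", "immediately", "emergency",
   "soon", "quickly", "priority"]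

-- inner loop of the sweep: try every keyword at position i.
-- Python's text.startswith(kw, i) is exactly 'kw.toList is a prefix of text.toList.drop i'.
def pvScanAt (t : List Char) (i : Nat) (s : PySem.Set String) : PySem.Set String :=
  pvKeywords.foldl (fun s kw => if PySem.Chars.startswith (t.drop i) kw.toList then PySem.Set.add s kw else s) s

-- outer loop: for i in range(len(text))
def pvScan (t : List Char) : PySem.Set String :=
  (List.range t.length).foldl (fun s i => pvScanAt t i s) PySem.Set.empty

-- the for-with-break loops: first keyword of 'order' present in the found set
def pvFirstFound (order : List String) (found : PySem.Set String) : Option String :=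
  match order with
  | [] => none
  | kw :: rest => if PySem.Set.contains found kw then some kw else pvFirstFound rest found

def extract_callback_info_from_speech_py_alt (customer_input : String) : List (String × String) :=
  let text := PySem.Str.lower customer_input
  let found := pvScan text.toList
  let info : PySem.Dict String String := PySem.Dict.empty
  let info := match pvFirstFound ["tomorrow", "next week", "monday", "tuesday", "wednesday", "thursday", "friday"] found with
              | none => info
              | some kw => info.insert "requested_time" kw
  let info := match pvFirstFound ["morning", "afternoon", "evening"] found with
              | none => info.insert "time_preference" "anytime"
              | some kw => info.insert "time_preference" kw
  let info :=
    if !(PySem.Set.isdisjoint (PySem.Set.ofList ["urgent", "asap", "immediately", "emergency"]) found) then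
      info.insert "urgency_level" "urgent"
    else if !(PySem.Set.isdisjoint (PySem.Set.ofList ["soon", "quickly", "priority"]) found) then
      info.insert "urgency_level" "high"
    else info.insert "urgency_level" "normal"
  info.items

-- ===== PRECONDITION & SPEC =====
def Spec_extract_callback_info_from_speech_py (customer_input : String) (out : List (String × String)) : Prop := out = extract_callback_info_from_speech_py_alt customer_input
instance (customer_input : String) (out : List (String × String)) : Decidable (Spec_extract_callback_info_from_speech_py customer_input out) := by unfold Spec_extract_callback_info_from_speech_py; infer_instance

-- ===== CLAIM =====
def Claim_equal_extract_callback_info_from_speech_py : Prop := ∀ (customer_input : String), Dom_extract_callback_info_from_speech_py customer_input → Spec_extract_callback_info_from_speech_py customer_input (extract_callback_info_from_speech_py customer_input)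

-- ===== LEMMAS AND PROOFS =====
lemma pv_mem_inner (ks : List String) (u : List Char) (s : PySem.Set String) (x : String) :
    x ∈ ks.foldl (fun s kw => if PySem.Chars.startswith u kw.toList then PySem.Set.add s kw else s) s ↔
      x ∈ s ∨ ∃ kw ∈ ks, x = kw ∧ kw.toList <+: u := by
  induction ks generalizing s with
  | nil => simp
  | cons k ks ih =>
    simp only [List.foldl_cons]
    rw [ih]
    by_cases h : PySem.Chars.startswith u k.toList = true
    · have hp : k.toList <+: u := (PySem.Chars.startswith_iff u k.toList).mp h
      simp only [h, if_true, PySem.Set.mem_add, List.exists_mem_cons_iff]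
      tauto
    · have hp : ¬ k.toList <+: u := fun hc => h ((PySem.Chars.startswith_iff u k.toList).mpr hc)
      simp only [h, List.exists_mem_cons_iff]
      tauto

lemma pv_mem_scanAt (t : List Char) (i : Nat) (s : PySem.Set String) (x : String) :
    x ∈ pvScanAt t i s ↔ x ∈ s ∨ (x ∈ pvKeywords ∧ x.toList <+: t.drop i) := by
  unfold pvScanAt
  rw [pv_mem_inner]
  constructor
  · rintro (hs | ⟨kw, hkw, rfl, hp⟩)
    · exact Or.inl hs
    · exact Or.inr ⟨hkw, hp⟩
  · rintro (hs | ⟨hk, hp⟩)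
    · exact Or.inl hs
    · exact Or.inr ⟨x, hk, rfl, hp⟩

lemma pv_mem_scan_aux (t : List Char) (is : List Nat) (s : PySem.Set String) (x : String) :
    x ∈ is.foldl (fun s i => pvScanAt t i s) s ↔
      x ∈ s ∨ ∃ i ∈ is, x ∈ pvKeywords ∧ x.toList <+: t.drop i := by
  induction is generalizing s with
  | nil => simp
  | cons j js ih =>
    simp only [List.foldl_cons]
    rw [ih, pv_mem_scanAt]
    simp only [List.exists_mem_cons_iff]
    tauto

lemma pv_mem_scan (t : List Char) (x : String) :
    x ∈ pvScan t ↔ ∃ i, i < t.length ∧ x ∈ pvKeywords ∧ x.toList <+: t.drop i := by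
  unfold pvScan
  rw [pv_mem_scan_aux]
  simp [PySem.Set.empty, List.mem_range]

lemma pv_contains_scan (t : String) (kw : String) (hk : kw ∈ pvKeywords) (hne : kw.toList ≠ []) :
    PySem.Set.contains (pvScan t.toList) kw = PySem.Str.isIn kw t := by
  have h : PySem.Set.contains (pvScan t.toList) kw = true ↔ PySem.Str.isIn kw t = true := by
    rw [PySem.Set.contains_iff, pv_mem_scan, PySem.Str.isIn_eq, ← PySem.Chars.exists_prefix_drop_iff_isIn]
    constructor
    · rintro ⟨i, _, _, hp⟩; exact ⟨i, hp⟩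
    · rintro ⟨j, hp⟩
      by_cases hj : j < t.toList.length
      · exact ⟨j, hj, hk, hp⟩
      · exfalso
        have hd : t.toList.drop j = [] := List.drop_eq_nil_of_le (le_of_not_gt hj)
        rw [hd] at hp
        exact hne (List.prefix_nil.mp hp)
  exact Bool.coe_iff_coe.mp h

lemma pv_not_isdisjoint (l : List String) (found : PySem.Set String) :
    (!(PySem.Set.isdisjoint (PySem.Set.ofList l) found)) = l.any (fun x => PySem.Set.contains found x) := by
  apply Bool.coe_iff_coe.mp
  have hiff : PySem.Set.isdisjoint (PySem.Set.ofList l) found = true ↔ ∀ x ∈ l, x ∉ found := by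
    rw [PySem.Set.isdisjoint_iff]
    constructor
    · intro h x hx; exact h x ((PySem.Set.mem_ofList l x).mpr hx)
    · intro h x hx; exact h x ((PySem.Set.mem_ofList l x).mp hx)
  rw [Bool.not_eq_true', Bool.eq_false_iff, Ne, hiff, List.any_eq_true]
  push Not
  simp

lemma pv_time (b1 b2 b3 b4 b5 b6 b7 : Bool) :
    (if b1 then PySem.Dict.empty.insert "requested_time" "tomorrow"
     else if b2 then PySem.Dict.empty.insert "requested_time" "next week"
     else if b3 then PySem.Dict.empty.insert "requested_time" "monday"
     else if b4 then PySem.Dict.empty.insert "requested_time" "tuesday"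
     else if b5 then PySem.Dict.empty.insert "requested_time" "wednesday"
     else if b6 then PySem.Dict.empty.insert "requested_time" "thursday"
     else if b7 then PySem.Dict.empty.insert "requested_time" "friday"
     else (PySem.Dict.empty : PySem.Dict String String)) =
    (match (if b1 then some "tomorrow" else if b2 then some "next week"
            else if b3 then some "monday" else if b4 then some "tuesday"
            else if b5 then some "wednesday" else if b6 then some "thursday"
            else if b7 then some "friday" else none) with
     | none => (PySem.Dict.empty : PySem.Dict String String)
     | some kw => PySem.Dict.empty.insert "requested_time" kw) := by
  cases b1 <;> cases b2 <;> cases b3 <;> cases b4 <;> cases b5 <;> cases b6 <;> cases b7 <;> rfl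

lemma pv_pref (b1 b2 b3 : Bool) (d : PySem.Dict String String) :
    (if b1 then d.insert "time_preference" "morning"
     else if b2 then d.insert "time_preference" "afternoon"
     else if b3 then d.insert "time_preference" "evening"
     else d.insert "time_preference" "anytime") =
    (match (if b1 then some "morning" else if b2 then some "afternoon"
            else if b3 then some "evening" else none) with
     | none => d.insert "time_preference" "anytime"
     | some kw => d.insert "time_preference" kw) := by
  cases b1 <;> cases b2 <;> cases b3 <;> rfl

set_option maxHeartbeats 2000000 in
-- ===== VERDICT =====
theorem extract_callback_info_from_speech_py_spec : Claim_equal_extract_callback_info_from_speech_py := by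
  intro s _
  unfold Spec_extract_callback_info_from_speech_py
  simp only [extract_callback_info_from_speech_py, extract_callback_info_from_speech_py_alt]
  set t := PySem.Str.lower s with ht
  have h1 := pv_contains_scan t "tomorrow" (by decide) (by decide)
  have h2 := pv_contains_scan t "next week" (by decide) (by decide)
  have h3 := pv_contains_scan t "monday" (by decide) (by decide)
  have h4 := pv_contains_scan t "tuesday" (by decide) (by decide)
  have h5 := pv_contains_scan t "wednesday" (by decide) (by decide)
  have h6 := pv_contains_scan t "thursday" (by decide) (by decide)
  have h7 := pv_contains_scan t "friday" (by decide) (by decide)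
  have h8 := pv_contains_scan t "morning" (by decide) (by decide)
  have h9 := pv_contains_scan t "afternoon" (by decide) (by decide)
  have h10 := pv_contains_scan t "evening" (by decide) (by decide)
  have h11 := pv_contains_scan t "urgent" (by decide) (by decide)
  have h12 := pv_contains_scan t "asap" (by decide) (by decide)
  have h13 := pv_contains_scan t "immediately" (by decide) (by decide)
  have h14 := pv_contains_scan t "emergency" (by decide) (by decide)
  have h15 := pv_contains_scan t "soon" (by decide) (by decide)
  have h16 := pv_contains_scan t "quickly" (by decide) (by decide)
  have h17 := pv_contains_scan t "priority" (by decide) (by decide)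
  simp only [pvFirstFound, pv_not_isdisjoint, List.any_cons, List.any_nil,
    h1, h2, h3, h4, h5, h6, h7, h8, h9, h10, h11, h12, h13, h14, h15, h16, h17]
  simp only [pv_time, pv_pref]
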